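-- pv_equiv track=rewrite | github.com/Flytre/artificial-intel-2020-2021 | Unit4/crossword.py | parse_dim
-- ===== SOURCE A (Python) =====
-- def parse_dim(dim: str):
--     toggle = False
--     x = y = ""
--     end: int = len(dim) - 1
--     for i in range(0, len(dim)):
--         char = dim[i]
--         if char.isnumeric():
--             if toggle:
--                 y += char
--             else:
--                 x += char
--         else:
--             if not toggle:
--                 toggle = True
--             else:
--                 end = i
--                 break
--     return int(x), int(y), end
-- ===== SOURCE B (Python) =====
-- def parse_dim(dim: str):
--     n = len(dim)
--     i = 0
--     while i < n and dim[i].isnumeric():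
--         i += 1
--     j = i + 1
--     while j < n and dim[j].isnumeric():
--         j += 1
--     end = j if j < n else n - 1
--     return int(dim[:i]), int(dim[i + 1:j]), end
-- ===== Notes on version B (the rewrite author's own statement) =====
-- stated objective: alternative
-- what changed: Replaces A's single toggle-driven loop that accumulates the two number strings character by character with two index scans over the string followed by slicing out the two digit runs.
import Mathlib
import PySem

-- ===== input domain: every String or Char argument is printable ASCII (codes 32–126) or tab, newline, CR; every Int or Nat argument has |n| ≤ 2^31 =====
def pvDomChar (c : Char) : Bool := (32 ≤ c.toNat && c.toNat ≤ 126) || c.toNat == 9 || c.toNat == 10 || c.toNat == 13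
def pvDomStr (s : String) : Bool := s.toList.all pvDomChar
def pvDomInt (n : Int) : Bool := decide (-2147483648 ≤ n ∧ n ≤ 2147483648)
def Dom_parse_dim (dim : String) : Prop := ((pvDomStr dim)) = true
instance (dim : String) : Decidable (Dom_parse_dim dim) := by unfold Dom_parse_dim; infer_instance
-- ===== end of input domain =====

-- B replaces A's single toggle-and-accumulate loop by two index scans plus slicing (objective: simpler decomposition, same cost).
-- On the ASCII domain Dom_, Python's str.isnumeric agrees with str.isdigit; both ports use PySem.Chars.isdigit.

-- ===== PORT A =====
-- the for-loop of A: state (i, toggle, x, y, end); break returns immediately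
def pvLoopA : List Char → Nat → Bool → List Char → List Char → Int → List Char × List Char × Int
  | [], _, _, x, y, e => (x, y, e)
  | c :: cs, i, tog, x, y, e =>
    if PySem.Chars.isdigit c then
      if tog then pvLoopA cs (i + 1) tog x (y ++ [c]) e
      else pvLoopA cs (i + 1) tog (x ++ [c]) y e
    else
      if !tog then pvLoopA cs (i + 1) true x y e
      else (x, y, (i : Int))

def parse_dim (dim : String) : Int × Int × Int :=
  let l := dim.toList
  let r := pvLoopA l 0 false [] [] ((l.length : Int) - 1)
  -- Python's int() raises ValueError where ofChars? is none; Pre_ excludes exactly those inputs, so .getD 0 is never the value on Pre_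
  ((PySem.Int.ofChars? r.1).getD 0, (PySem.Int.ofChars? r.2.1).getD 0, r.2.2)

-- ===== PORT B =====
-- the while loops of Source B: advance index while in range and the char is a digit
def pvScanB (l : List Char) (i : Nat) : Nat :=
  if h : i < l.length then
    (if PySem.Chars.isdigit l[i] then pvScanB l (i + 1) else i)
  else i
termination_by l.length - i

def parse_dim_alt (dim : String) : Int × Int × Int :=
  let l := dim.toList
  let n := l.length
  let i := pvScanB l 0
  let j := pvScanB l (i + 1)
  let e : Int := if j < n then (j : Int) else (n : Int) - 1
  ((PySem.Int.ofChars? (PySem.List.slice l (some 0) (some (i : Int)))).getD 0,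
   (PySem.Int.ofChars? (PySem.Chars.slice l (some ((i : Int) + 1)) (some (j : Int)))).getD 0,
   e)

-- ===== PRECONDITION & SPEC =====
-- Pre_ excludes exactly the inputs on which A raises ValueError (both programs raise there): the string
-- must start with at least one digit, and at least one digit must follow the first non-digit character.
def Pre_parse_dim (dim : String) : Prop :=
  let l := dim.toList
  let k := (l.takeWhile (fun c => PySem.Chars.isdigit c)).length
  0 < k ∧ (l.drop (k + 1)).takeWhile (fun c => PySem.Chars.isdigit c) ≠ []
instance (dim : String) : Decidable (Pre_parse_dim dim) := by unfold Pre_parse_dim; infer_instance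

def pvWitness_parse_dim : String := "12x34y"

def Spec_parse_dim (dim : String) (out : Int × Int × Int) : Prop := out = parse_dim_alt dim
instance (dim : String) (out : Int × Int × Int) : Decidable (Spec_parse_dim dim out) := by unfold Spec_parse_dim; infer_instance

-- ===== CLAIM (what is proved, stated in full; the proofs are below) =====
def Claim_equal_parse_dim : Prop := ∀ (dim : String), Dom_parse_dim dim → Pre_parse_dim dim → Spec_parse_dim dim (parse_dim dim)

-- ===== LEMMAS AND PROOFS =====

theorem pvScanB_eq (l : List Char) (i : Nat) :
    pvScanB l i = i + ((l.drop i).takeWhile (fun c => PySem.Chars.isdigit c)).length := by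
  have H : ∀ (n i : Nat), l.length - i ≤ n →
      pvScanB l i = i + ((l.drop i).takeWhile (fun c => PySem.Chars.isdigit c)).length := by
    intro n
    induction n with
    | zero =>
        intro i h
        rw [pvScanB]
        have hi : ¬ i < l.length := by omega
        rw [dif_neg hi, List.drop_eq_nil_of_le (by omega)]
        simp
    | succ n ih =>
        intro i h
        rw [pvScanB]
        by_cases hi : i < l.length
        · rw [dif_pos hi]
          by_cases hd : PySem.Chars.isdigit l[i] = true
          · rw [if_pos hd, ih (i + 1) (by omega), List.drop_eq_getElem_cons hi,
              List.takeWhile_cons, hd]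
            simp
            omega
          · rw [if_neg hd, List.drop_eq_getElem_cons hi, List.takeWhile_cons]
            simp [hd]
        · rw [dif_neg hi, List.drop_eq_nil_of_le (by omega)]
          simp
  exact H l.length i (by omega)

-- phase 1 of A's loop (toggle = false): consume the leading digit run into x, then the delimiter
theorem pvLoopA_phase1 (l : List Char) (i : Nat) (x y : List Char) (e : Int) :
    pvLoopA l i false x y e =
      if l.dropWhile (fun c => PySem.Chars.isdigit c) = [] then
        (x ++ l.takeWhile (fun c => PySem.Chars.isdigit c), y, e)
      else
        pvLoopA (l.dropWhile (fun c => PySem.Chars.isdigit c)).tail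
          (i + (l.takeWhile (fun c => PySem.Chars.isdigit c)).length + 1) true
          (x ++ l.takeWhile (fun c => PySem.Chars.isdigit c)) y e := by
  induction l generalizing i x with
  | nil => simp [pvLoopA]
  | cons c cs ih =>
      by_cases hd : PySem.Chars.isdigit c = true
      · rw [pvLoopA]
        simp only [hd, ite_true, Bool.false_eq_true, ite_false,
          List.dropWhile_cons, List.takeWhile_cons]
        rw [ih]
        split_ifs with h
        · simp
        · rw [List.append_assoc, List.singleton_append,
            show i + 1 + (cs.takeWhile (fun c => PySem.Chars.isdigit c)).length + 1
              = i + (c :: cs.takeWhile (fun c => PySem.Chars.isdigit c)).length + 1 by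
            rw [List.length_cons]; omega]
      · rw [pvLoopA]
        simp [hd]

-- phase 2 of A's loop (toggle = true): consume the next digit run into y, then stop
theorem pvLoopA_phase2 (l : List Char) (i : Nat) (x y : List Char) (e : Int) :
    pvLoopA l i true x y e =
      (x, y ++ l.takeWhile (fun c => PySem.Chars.isdigit c),
       if l.dropWhile (fun c => PySem.Chars.isdigit c) = [] then e
       else ((i : Int) + ((l.takeWhile (fun c => PySem.Chars.isdigit c)).length : Int))) := by
  induction l generalizing i y with
  | nil => simp [pvLoopA]
  | cons c cs ih =>
      by_cases hd : PySem.Chars.isdigit c = true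
      · rw [pvLoopA]
        simp only [hd, if_pos, List.dropWhile_cons, List.takeWhile_cons]
        rw [ih]
        refine Prod.ext rfl (Prod.ext (by simp) ?_)
        simp only []
        split_ifs with h1
        · rfl
        · simp only [List.length_cons]
          push_cast
          ring
      · rw [pvLoopA]
        simp [hd]

theorem pvMain (l : List Char)
    (_hk : 0 < (l.takeWhile (fun c => PySem.Chars.isdigit c)).length)
    (hy : (l.drop ((l.takeWhile (fun c => PySem.Chars.isdigit c)).length + 1)).takeWhile
            (fun c => PySem.Chars.isdigit c) ≠ []) :
    ((PySem.Int.ofChars? (pvLoopA l 0 false [] [] ((l.length : Int) - 1)).1).getD 0,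
     (PySem.Int.ofChars? (pvLoopA l 0 false [] [] ((l.length : Int) - 1)).2.1).getD 0,
     (pvLoopA l 0 false [] [] ((l.length : Int) - 1)).2.2) =
    ((PySem.Int.ofChars? (PySem.List.slice l (some 0) (some ((pvScanB l 0 : Nat) : Int)))).getD 0,
     (PySem.Int.ofChars? (PySem.List.slice l (some (((pvScanB l 0 : Nat) : Int) + 1))
         (some ((pvScanB l (pvScanB l 0 + 1) : Nat) : Int)))).getD 0,
     if pvScanB l (pvScanB l 0 + 1) < l.length then ((pvScanB l (pvScanB l 0 + 1) : Nat) : Int)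
     else (l.length : Int) - 1) := by
  have hp : ∀ (m : List Char), (m.takeWhile (fun c => PySem.Chars.isdigit c)).length ≤ m.length :=
    fun m => (List.takeWhile_prefix _).length_le
  set k := (l.takeWhile (fun c => PySem.Chars.isdigit c)).length with hkdef
  have hsplit : l.takeWhile (fun c => PySem.Chars.isdigit c)
      ++ l.dropWhile (fun c => PySem.Chars.isdigit c) = l := List.takeWhile_append_dropWhile
  have hdropk : l.drop k = l.dropWhile (fun c => PySem.Chars.isdigit c) := by
    conv_lhs => rw [← hsplit]
    rw [hkdef, List.drop_left]
  have hne : l.dropWhile (fun c => PySem.Chars.isdigit c) ≠ [] := by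
    intro h
    apply hy
    rw [← List.tail_drop, hdropk, h]
    simp
  obtain ⟨c, rest, hcr⟩ := List.exists_cons_of_ne_nil hne
  have hrest' : rest = l.drop (k + 1) := by
    rw [← List.tail_drop, hdropk, hcr]
    rfl
  set m := (rest.takeWhile (fun c => PySem.Chars.isdigit c)).length with hmdef
  -- B's indices
  have hi : pvScanB l 0 = k := by
    rw [pvScanB_eq, List.drop_zero, ← hkdef]
    omega
  have hj : pvScanB l (k + 1) = k + 1 + m := by
    rw [pvScanB_eq, ← hrest', ← hmdef]
  -- A's loop value
  have hA : pvLoopA l 0 false [] [] ((l.length : Int) - 1) =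
      (l.takeWhile (fun c => PySem.Chars.isdigit c),
       rest.takeWhile (fun c => PySem.Chars.isdigit c),
        if rest.dropWhile (fun c => PySem.Chars.isdigit c) = []
        then ((l.length : Int) - 1) else ((k : Int) + 1 + (m : Int))) := by
    rw [pvLoopA_phase1, if_neg hne, hcr, List.tail_cons, pvLoopA_phase2]
    simp only [List.nil_append, ← hkdef, ← hmdef]
    split_ifs
    · rfl
    · push_cast; ring_nf
  -- B's slices
  have hxslice : PySem.List.slice l (some 0) (some ((k : Nat) : Int))
      = l.takeWhile (fun c => PySem.Chars.isdigit c) := by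
    have h0 : (some (0 : Int)) = some (((0 : Nat) : Int)) := by norm_num
    rw [h0, PySem.List.slice_natCast l 0 k]
    simp only [List.drop_zero, Nat.sub_zero, hkdef]
    exact (List.prefix_iff_eq_take.mp (List.takeWhile_prefix _)).symm
  have hyslice : PySem.List.slice l (some (((k : Nat) : Int) + 1))
      (some (((k + 1 + m : Nat)) : Int)) = rest.takeWhile (fun c => PySem.Chars.isdigit c) := by
    have h1 : ((k : Nat) : Int) + 1 = (((k + 1 : Nat)) : Int) := by push_cast; ring
    rw [h1, PySem.List.slice_natCast l (k + 1) (k + 1 + m), ← hrest']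
    have h2 : k + 1 + m - (k + 1) = m := by omega
    rw [h2, hmdef]
    exact (List.prefix_iff_eq_take.mp (List.takeWhile_prefix _)).symm
  -- lengths
  have hlen : l.length = k + 1 + rest.length := by
    conv_lhs => rw [← hsplit, hcr]
    simp [hkdef]
    omega
  have hmlen : m ≤ rest.length := hp rest
  -- the end index
  have hend : (if pvScanB l (pvScanB l 0 + 1) < l.length then
        ((pvScanB l (pvScanB l 0 + 1) : Nat) : Int) else (l.length : Int) - 1)
      = (if rest.dropWhile (fun c => PySem.Chars.isdigit c) = []
         then ((l.length : Int) - 1) else ((k : Int) + 1 + (m : Int))) := by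
    rw [hi, hj]
    by_cases hre : rest.dropWhile (fun c => PySem.Chars.isdigit c) = []
    · have htw : rest.takeWhile (fun c => PySem.Chars.isdigit c) = rest := by
        rw [List.takeWhile_eq_self_iff]
        exact List.dropWhile_eq_nil_iff.mp hre
      have hm : m = rest.length := by rw [hmdef, htw]
      rw [if_neg (by omega), if_pos hre]
    · have hm : m < rest.length := by
        rcases lt_or_eq_of_le hmlen with h | h
        · exact h
        · exfalso
          apply hre
          rw [List.dropWhile_eq_nil_iff, ← List.takeWhile_eq_self_iff]
          exact (List.takeWhile_prefix _).eq_of_length h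
      rw [if_pos (by omega), if_neg hre]
      push_cast
      ring
  rw [hA, hend, hi, hj, hxslice, hyslice]

-- ===== VERDICT (by name: the statement is the Claim_ definition above) =====
theorem parse_dim_spec : Claim_equal_parse_dim := by
  intro dim _ hpre
  unfold Pre_parse_dim at hpre
  unfold Spec_parse_dim parse_dim parse_dim_alt
  exact pvMain dim.toList hpre.1 hpre.2
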